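-- pv_equiv track=rewrite | github.com/iknoom/Problem_Solving | BOJ/10453.py | solution
-- ===== SOURCE A (Python) =====
-- def solution(A, B):
--     Aa = []
--     Ba = []
--     for i in range(len(A)):
--         if A[i] == 'a':
--             Aa.append(i)
--         if B[i] == 'a':
--             Ba.append(i)
--     if len(Aa) != len(Ba):
--         return -1
--     return sum(abs(Aa[i] - Ba[i]) for i in range(len(Aa)))
-- ===== SOURCE B (Python) =====
-- def solution(A, B):
--     bal = 0
--     total = 0
--     for i in range(len(A)):
--         if A[i] == 'a':
--             bal += 1
--         if B[i] == 'a':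
--             bal -= 1
--         total += abs(bal)
--     if bal != 0:
--         return -1
--     return total
-- ===== Notes on version B (the rewrite author's own statement) =====
-- stated objective: alternative
-- what changed: Replaces the two collected position lists and index-by-index matched-pair summation with a single pass maintaining one running prefix-imbalance counter bal, accumulating abs(bal) at each index; bal != 0 at the end replaces the length comparison.
import Mathlib
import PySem

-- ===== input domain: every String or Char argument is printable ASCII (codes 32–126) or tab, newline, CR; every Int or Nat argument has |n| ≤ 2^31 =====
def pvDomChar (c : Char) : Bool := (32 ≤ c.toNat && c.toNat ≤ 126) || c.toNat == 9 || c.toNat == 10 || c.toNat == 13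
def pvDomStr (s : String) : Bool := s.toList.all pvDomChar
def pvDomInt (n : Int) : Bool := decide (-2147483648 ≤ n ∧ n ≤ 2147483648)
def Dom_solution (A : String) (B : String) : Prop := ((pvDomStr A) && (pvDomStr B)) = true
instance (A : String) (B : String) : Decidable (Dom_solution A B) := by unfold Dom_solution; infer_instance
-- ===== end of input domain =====

-- B replaces A's two collected position lists and matched-pair summation by a single pass
-- over the indices maintaining a running prefix-imbalance counter (objective: alternative).

-- ===== PORT A =====
-- body of A's collecting loop (i runs over range(len(A)); A[i], B[i] via pyGetD — in range on Pre_)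
def solFA (la lb : List Char) (st : List Int × List Int) (i : Int) : List Int × List Int :=
  let st1 := if PySem.List.pyGetD la i ' ' = 'a' then (st.1 ++ [i], st.2) else st
  if PySem.List.pyGetD lb i ' ' = 'a' then (st1.1, st1.2 ++ [i]) else st1

def solution (A : String) (B : String) : Int :=
  let la := A.toList
  let lb := B.toList
  let p := (PySem.List.pyRange 0 (la.length : Int) 1).foldl (solFA la lb) ([], [])
  if p.1.length ≠ p.2.length then -1
  else (PySem.List.pyRange 0 (p.1.length : Int) 1).foldl
    (fun acc i => acc + |PySem.List.pyGetD p.1 i 0 - PySem.List.pyGetD p.2 i 0|) 0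

-- ===== PORT B =====
-- body of B's single pass: bal += (A[i]=='a'); bal -= (B[i]=='a'); total += abs(bal)
def solFB (la lb : List Char) (st : Int × Int) (i : Int) : Int × Int :=
  let bal := st.1 + (if PySem.List.pyGetD la i ' ' = 'a' then 1 else 0)
  let bal := bal - (if PySem.List.pyGetD lb i ' ' = 'a' then 1 else 0)
  (bal, st.2 + |bal|)

def solution_alt (A : String) (B : String) : Int :=
  let la := A.toList
  let lb := B.toList
  let r := (PySem.List.pyRange 0 (la.length : Int) 1).foldl (solFB la lb) (0, 0)
  if r.1 ≠ 0 then -1 else r.2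

-- ===== PRECONDITION & SPEC =====
-- Pre_ excludes exactly the inputs with len(B) < len(A), on which Python A raises IndexError at B[i]
-- (B raises there too); on everything else A returns normally and Pre_ admits it.
def Pre_solution (A : String) (B : String) : Prop := A.toList.length ≤ B.toList.length
instance (A : String) (B : String) : Decidable (Pre_solution A B) := by unfold Pre_solution; infer_instance

def pvWitness_solution : String × String := ("ab", "ba")

def Spec_solution (A : String) (B : String) (out : Int) : Prop := out = solution_alt A B
instance (A : String) (B : String) (out : Int) : Decidable (Spec_solution A B out) := by unfold Spec_solution; infer_instance

-- ===== CLAIM (what is proved, stated in full; the proofs are below) =====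
def Claim_equal_solution : Prop := ∀ (A : String) (B : String), Dom_solution A B → Pre_solution A B → Spec_solution A B (solution A B)

-- ===== LEMMAS AND PROOFS =====

def tailCharge (k : Int) (zs : List Int) : Int := (zs.map (fun p => k - p)).sum

def cost (k : Int) : List Int → List Int → Int
  | x :: xs, y :: ys => |x - y| + cost k xs ys
  | [], ys => tailCharge k ys
  | xs, [] => tailCharge k xs

lemma tailCharge_cons (k x : Int) (zs : List Int) :
    tailCharge k (x :: zs) = (k - x) + tailCharge k zs := by simp [tailCharge]

lemma tailCharge_succ (k : Int) (zs : List Int) :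
    tailCharge (k + 1) zs = tailCharge k zs + zs.length := by
  induction zs with
  | nil => simp [tailCharge]
  | cons z zs ih => simp [tailCharge_cons, ih]; ring

lemma cost_nil_left (k : Int) (ys : List Int) : cost k [] ys = tailCharge k ys := by cases ys <;> rfl

lemma cost_nil_right (k : Int) (xs : List Int) : cost k xs [] = tailCharge k xs := by cases xs <;> rfl

lemma cost_cons_cons (k x y : Int) (xs ys : List Int) :
    cost k (x :: xs) (y :: ys) = |x - y| + cost k xs ys := rfl

lemma cost_step_none (k : Int) (xs ys : List Int) :
    cost (k + 1) xs ys = cost k xs ys + |(xs.length : Int) - (ys.length : Int)| := by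
  induction xs generalizing ys with
  | nil =>
    rw [cost_nil_left, cost_nil_left, tailCharge_succ, abs_of_nonpos (by simp)]
    simp
  | cons x xs ih =>
    cases ys with
    | nil =>
      rw [cost_nil_right, cost_nil_right, tailCharge_succ, abs_of_nonneg (by simp; positivity)]
      simp
    | cons y ys =>
      rw [cost_cons_cons, cost_cons_cons, ih]
      have h2 : |((x :: xs).length : Int) - ((y :: ys).length : Int)|
          = |(xs.length : Int) - (ys.length : Int)| := by
        congr 1; push_cast [List.length_cons]; ring
      rw [h2]; ring

lemma tailCharge_append_singleton (k x : Int) (zs : List Int) :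
    tailCharge k (zs ++ [x]) = tailCharge k zs + (k - x) := by
  simp [tailCharge]

lemma cost_step_left (k : Int) (xs ys : List Int)
    (hy : ∀ p ∈ ys, p < k) :
    cost (k + 1) (xs ++ [k]) ys = cost k xs ys + |(xs.length : Int) + 1 - (ys.length : Int)| := by
  induction xs generalizing ys with
  | nil =>
    cases ys with
    | nil => simp [cost, tailCharge]
    | cons y ys =>
      have hyk : y < k := hy y (by simp)
      simp only [List.nil_append, cost_cons_cons, cost_nil_left, tailCharge_succ, tailCharge_cons]
      rw [abs_of_nonneg (by omega),
        abs_of_nonpos (by push_cast [List.length_cons, List.length_nil]; omega)]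
      push_cast [List.length_cons, List.length_nil]; ring
  | cons x xs ih =>
    cases ys with
    | nil =>
      simp only [List.cons_append, cost_nil_right, tailCharge_cons, tailCharge_succ,
        tailCharge_append_singleton]
      rw [abs_of_nonneg (by push_cast [List.length_cons, List.length_nil]; omega)]
      push_cast [List.length_cons, List.length_nil, List.length_append]; ring
    | cons y ys =>
      rw [List.cons_append, cost_cons_cons, cost_cons_cons,
        ih ys (fun p hp => hy p (List.mem_cons_of_mem y hp))]
      have h2 : |((x :: xs).length : Int) + 1 - ((y :: ys).length : Int)|
          = |(xs.length : Int) + 1 - (ys.length : Int)| := by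
        congr 1; push_cast [List.length_cons]; ring
      rw [h2]; ring

lemma cost_step_both (k : Int) (xs ys : List Int)
    (hx : ∀ p ∈ xs, p < k) (hy : ∀ p ∈ ys, p < k) :
    cost (k + 1) (xs ++ [k]) (ys ++ [k]) = cost k xs ys + |(xs.length : Int) - (ys.length : Int)| := by
  induction xs generalizing ys with
  | nil =>
    cases ys with
    | nil => simp [cost, tailCharge]
    | cons y ys =>
      have hyk : y < k := hy y (by simp)
      simp only [List.nil_append, List.cons_append, cost_cons_cons, cost_nil_left,
        tailCharge_succ, tailCharge_append_singleton, tailCharge_cons]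
      rw [abs_of_nonneg (by omega),
        abs_of_nonpos (by push_cast [List.length_cons, List.length_nil]; omega)]
      push_cast [List.length_cons, List.length_nil]; ring
  | cons x xs ih =>
    have hxk : x < k := hx x (by simp)
    cases ys with
    | nil =>
      simp only [List.cons_append, List.nil_append, cost_cons_cons, cost_nil_right,
        tailCharge_succ, tailCharge_append_singleton, tailCharge_cons]
      rw [abs_of_nonpos (by omega),
        abs_of_nonneg (by push_cast [List.length_cons, List.length_nil]; omega)]
      push_cast [List.length_cons, List.length_nil]; ring
    | cons y ys =>
      rw [List.cons_append, List.cons_append, cost_cons_cons, cost_cons_cons,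
        ih ys (fun p hp => hx p (List.mem_cons_of_mem x hp))
          (fun p hp => hy p (List.mem_cons_of_mem y hp))]
      have h2 : |((x :: xs).length : Int) - ((y :: ys).length : Int)|
          = |(xs.length : Int) - (ys.length : Int)| := by
        congr 1; push_cast [List.length_cons]; ring
      rw [h2]; ring

lemma cost_comm (k : Int) (xs ys : List Int) : cost k xs ys = cost k ys xs := by
  induction xs generalizing ys with
  | nil => cases ys <;> simp [cost_nil_left, cost_nil_right]
  | cons x xs ih =>
    cases ys with
    | nil => simp [cost_nil_left, cost_nil_right]
    | cons y ys => simp [cost_cons_cons, ih, abs_sub_comm]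

lemma cost_step_right (k : Int) (xs ys : List Int)
    (hx : ∀ p ∈ xs, p < k) :
    cost (k + 1) xs (ys ++ [k]) = cost k xs ys + |(xs.length : Int) - ((ys.length : Int) + 1)| := by
  rw [cost_comm, cost_step_left k ys xs hx, cost_comm, abs_sub_comm]

lemma loop_inv (la lb : List Char) :
    ∀ (d k : Nat) (xs ys : List Int) (tot : Int),
    k + d = la.length →
    (∀ p ∈ xs, p < (k : Int)) → (∀ p ∈ ys, p < (k : Int)) →
    ((PySem.List.pyRange k (la.length : Int) 1).foldl (solFB la lb)
        ((xs.length : Int) - (ys.length : Int), tot)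
      = (let P := (PySem.List.pyRange k (la.length : Int) 1).foldl (solFA la lb) (xs, ys)
         ((P.1.length : Int) - (P.2.length : Int),
          tot + cost (la.length : Int) P.1 P.2 - cost k xs ys)))
    ∧ (∀ p ∈ ((PySem.List.pyRange k (la.length : Int) 1).foldl (solFA la lb) (xs, ys)).1,
        p < (la.length : Int))
    ∧ (∀ p ∈ ((PySem.List.pyRange k (la.length : Int) 1).foldl (solFA la lb) (xs, ys)).2,
        p < (la.length : Int)) := by
  intro d
  induction d with
  | zero =>
    intro k xs ys tot hk hx hy
    have hkeq : k = la.length := by omega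
    subst hkeq
    rw [PySem.List.pyRange_one_eq_nil (le_refl _)]
    refine ⟨?_, hx, hy⟩
    simp only [List.foldl_nil, Prod.mk.injEq, true_and]
    ring
  | succ d ihd =>
    intro k xs ys tot hk hx hy
    have hklt : (k : Int) < (la.length : Int) := by exact_mod_cast (by omega : k < la.length)
    rw [PySem.List.pyRange_one_cons hklt,
      show ((k : Int) + 1) = ((k + 1 : Nat) : Int) from by push_cast; ring,
      List.foldl_cons, List.foldl_cons]
    have hx1 : ∀ p ∈ xs ++ [(k : Int)], p < ((k + 1 : Nat) : Int) := by
      intro p hp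
      rcases List.mem_append.mp hp with h | h
      · have := hx p h; push_cast; omega
      · simp at h; subst h; push_cast; omega
    have hy1 : ∀ p ∈ ys ++ [(k : Int)], p < ((k + 1 : Nat) : Int) := by
      intro p hp
      rcases List.mem_append.mp hp with h | h
      · have := hy p h; push_cast; omega
      · simp at h; subst h; push_cast; omega
    have hx0 : ∀ p ∈ xs, p < ((k + 1 : Nat) : Int) := fun p hp => by
      have := hx p hp; push_cast; omega
    have hy0 : ∀ p ∈ ys, p < ((k + 1 : Nat) : Int) := fun p hp => by
      have := hy p hp; push_cast; omega
    have hcast : ((k + 1 : Nat) : Int) = (k : Int) + 1 := by push_cast; ring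
    by_cases hca : PySem.List.pyGetD la (k : Int) ' ' = 'a' <;>
      by_cases hcb : PySem.List.pyGetD lb (k : Int) ' ' = 'a'
    · -- 'a' in both
      have eA : solFA la lb (xs, ys) (k : Int) = (xs ++ [(k:Int)], ys ++ [(k:Int)]) := by
        simp only [solFA]; rw [if_pos hca, if_pos hcb]
      have eB : solFB la lb ((xs.length : Int) - (ys.length : Int), tot) (k : Int)
          = (((xs ++ [(k:Int)]).length : Int) - ((ys ++ [(k:Int)]).length : Int),
             tot + |(xs.length : Int) - (ys.length : Int)|) := by
        simp only [solFB]; rw [if_pos hca, if_pos hcb]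
        rw [Prod.mk.injEq]
        refine ⟨by push_cast [List.length_append, List.length_cons, List.length_nil]; ring, ?_⟩
        congr 1; congr 1; ring
      rw [eA, eB]
      obtain ⟨h1, h2, h3⟩ := ihd (k + 1) (xs ++ [(k:Int)]) (ys ++ [(k:Int)])
        (tot + |(xs.length : Int) - (ys.length : Int)|) (by omega) hx1 hy1
      refine ⟨?_, h2, h3⟩
      rw [h1]
      simp only [Prod.mk.injEq, true_and]
      rw [hcast, cost_step_both (k : Int) xs ys hx hy]
      ring
    · -- 'a' only in A
      have eA : solFA la lb (xs, ys) (k : Int) = (xs ++ [(k:Int)], ys) := by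
        simp only [solFA]; rw [if_pos hca, if_neg hcb]
      have eB : solFB la lb ((xs.length : Int) - (ys.length : Int), tot) (k : Int)
          = (((xs ++ [(k:Int)]).length : Int) - ((ys.length : Int)),
             tot + |(xs.length : Int) + 1 - (ys.length : Int)|) := by
        simp only [solFB]; rw [if_pos hca, if_neg hcb]
        rw [Prod.mk.injEq]
        refine ⟨by push_cast [List.length_append, List.length_cons, List.length_nil]; ring, ?_⟩
        congr 1; congr 1; ring
      rw [eA, eB]
      obtain ⟨h1, h2, h3⟩ := ihd (k + 1) (xs ++ [(k:Int)]) ys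
        (tot + |(xs.length : Int) + 1 - (ys.length : Int)|) (by omega) hx1 hy0
      refine ⟨?_, h2, h3⟩
      rw [h1]
      simp only [Prod.mk.injEq, true_and]
      rw [hcast, cost_step_left (k : Int) xs ys hy]
      ring
    · -- 'a' only in B
      have eA : solFA la lb (xs, ys) (k : Int) = (xs, ys ++ [(k:Int)]) := by
        simp only [solFA]; rw [if_neg hca, if_pos hcb]
      have eB : solFB la lb ((xs.length : Int) - (ys.length : Int), tot) (k : Int)
          = (((xs.length : Int)) - (((ys ++ [(k:Int)]).length : Int)),
             tot + |(xs.length : Int) - ((ys.length : Int) + 1)|) := by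
        simp only [solFB]; rw [if_neg hca, if_pos hcb]
        rw [Prod.mk.injEq]
        refine ⟨by push_cast [List.length_append, List.length_cons, List.length_nil]; ring, ?_⟩
        congr 1; congr 1; ring
      rw [eA, eB]
      obtain ⟨h1, h2, h3⟩ := ihd (k + 1) xs (ys ++ [(k:Int)])
        (tot + |(xs.length : Int) - ((ys.length : Int) + 1)|) (by omega) hx0 hy1
      refine ⟨?_, h2, h3⟩
      rw [h1]
      simp only [Prod.mk.injEq, true_and]
      rw [hcast, cost_step_right (k : Int) xs ys hx]
      ring
    · -- no 'a'
      have eA : solFA la lb (xs, ys) (k : Int) = (xs, ys) := by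
        simp only [solFA]; rw [if_neg hca, if_neg hcb]
      have eB : solFB la lb ((xs.length : Int) - (ys.length : Int), tot) (k : Int)
          = ((xs.length : Int) - (ys.length : Int),
             tot + |(xs.length : Int) - (ys.length : Int)|) := by
        simp only [solFB]; rw [if_neg hca, if_neg hcb]
        rw [Prod.mk.injEq]
        refine ⟨by ring, ?_⟩
        congr 1; congr 1; ring
      rw [eA, eB]
      obtain ⟨h1, h2, h3⟩ := ihd (k + 1) xs ys
        (tot + |(xs.length : Int) - (ys.length : Int)|) (by omega) hx0 hy0
      refine ⟨?_, h2, h3⟩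
      rw [h1]
      simp only [Prod.mk.injEq, true_and]
      rw [hcast, cost_step_none (k : Int) xs ys]
      ring

lemma cost_eq_zip_sum (k : Int) (xs ys : List Int) (h : xs.length = ys.length) :
    cost k xs ys = ((xs.zip ys).map (fun p => |p.1 - p.2|)).sum := by
  induction xs generalizing ys with
  | nil => cases ys with
    | nil => simp [cost_nil_left, tailCharge]
    | cons y ys => simp at h
  | cons x xs ih =>
    cases ys with
    | nil => simp at h
    | cons y ys =>
      simp only [List.length_cons, Nat.add_right_cancel_iff] at h
      simp [cost_cons_cons, ih ys h]

lemma range_sum_eq_zip_sum (xs ys : List Int) (h : xs.length = ys.length) :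
    ((List.range xs.length).map (fun j => |xs.getD j 0 - ys.getD j 0|)).sum
      = ((xs.zip ys).map (fun p => |p.1 - p.2|)).sum := by
  induction xs generalizing ys with
  | nil => simp
  | cons x xs ih =>
    cases ys with
    | nil => simp at h
    | cons y ys =>
      simp only [List.length_cons, Nat.add_right_cancel_iff] at h
      rw [List.length_cons, List.range_succ_eq_map, List.map_cons, List.map_map]
      simp only [Function.comp_def, Nat.succ_eq_add_one, List.getD_cons_succ, List.getD_cons_zero]
      rw [List.sum_cons, ih ys h]
      simp

lemma sum_loop_eq (xs ys : List Int) (h : xs.length = ys.length) :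
    (PySem.List.pyRange 0 (xs.length : Int) 1).foldl
      (fun acc i => acc + |PySem.List.pyGetD xs i 0 - PySem.List.pyGetD ys i 0|) 0
    = ((xs.zip ys).map (fun p => |p.1 - p.2|)).sum := by
  rw [PySem.List.foldl_add, PySem.List.pyRange_one, List.map_map]
  have h2 := range_sum_eq_zip_sum xs ys h
  simp only [List.getD_eq_getElem?_getD] at h2
  rw [← h2]
  simp [Function.comp_def]

lemma cost_nil_nil (k : Int) : cost k [] [] = 0 := rfl

theorem main_eq (A B : String) : solution A B = solution_alt A B := by
  obtain ⟨h1, h2, h3⟩ := loop_inv A.toList B.toList A.toList.length 0 [] [] 0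
    (by omega) (by simp) (by simp)
  simp only [Nat.cast_zero, List.length_nil, sub_self, sub_zero, zero_add, cost_nil_nil] at h1
  simp only [solution, solution_alt]
  rw [h1]
  by_cases hl : ((PySem.List.pyRange 0 (A.toList.length : Int) 1).foldl
      (solFA A.toList B.toList) ([], [])).1.length
    = ((PySem.List.pyRange 0 (A.toList.length : Int) 1).foldl
      (solFA A.toList B.toList) ([], [])).2.length
  · rw [if_neg (by omega), if_neg (by omega)]
    rw [sum_loop_eq _ _ hl, cost_eq_zip_sum _ _ _ hl]
  · rw [if_pos (by omega), if_pos (by omega)]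

-- ===== VERDICT (by name: the statement is the Claim_ definition above) =====
theorem solution_spec : Claim_equal_solution := by
  intro A B _ _
  unfold Spec_solution
  exact main_eq A B
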